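-- pv_equiv track=rewrite | github.com/MahimaAdvilkar/HealthOps | scripts/run_pipeline_from_csv.py | match_caregiver
-- ===== SOURCE A (Python) =====
-- from typing import Any, Dict, List
--
-- def match_caregiver(row: Dict[str, str], caregivers: List[Dict[str, str]]) -> str | None:
--     """Simple matcher: prefer same city and skill matches procedure/service_type."""
--     target_city = (row.get("patient_city") or "").strip().lower()
--     proc = (row.get("service_type") or "").strip().lower()
--
--     best_id = None
--     best_score = -1
--     for cg in caregivers:
--         if (cg.get("active") or "Y").strip().upper() != "Y":
--             continue
--         score = 0
--         if (cg.get("city") or "").strip().lower() == target_city: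
--             score += 2
--         skills = (cg.get("skills") or "").strip().lower()
--         if skills and proc and proc.split("_")[0] in skills:
--             score += 2
--         elif skills and (row.get("use_case") or "").strip().lower() in skills:
--             score += 1
--         if score > best_score:
--             best_score = score
--             best_id = cg.get("caregiver_id")
--     return best_id
-- ===== SOURCE B (Python) =====
-- def match_caregiver(row, caregivers):
--     """Bucket matcher: scores are bounded (0..4), so drop each active caregiver's id
--     into a fixed score bucket (first one wins) and return the highest non-empty bucket."""
--     target_city = (row.get("patient_city") or "").strip().lower()
--     proc = (row.get("service_type") or "").strip().lower()
--     use_case = (row.get("use_case") or "").strip().lower()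
--
--     seen = [False] * 5
--     buckets = [None] * 5
--     for cg in caregivers:
--         if (cg.get("active") or "Y").strip().upper() != "Y":
--             continue
--         s = 2 if (cg.get("city") or "").strip().lower() == target_city else 0
--         skills = (cg.get("skills") or "").strip().lower()
--         if skills and proc and proc.split("_")[0] in skills:
--             s += 2
--         elif skills and use_case in skills:
--             s += 1
--         if not seen[s]:
--             seen[s] = True
--             buckets[s] = cg.get("caregiver_id")
--     for s in range(4, -1, -1):
--         if seen[s]:
--             return buckets[s]
--     return None
-- ===== Notes on version B (the rewrite author's own statement) =====
-- stated objective: alternative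
-- what changed: Exploits the bounded score range (0..4): instead of threading a best_id/best_score accumulator, B drops each active caregiver's id into a fixed array of score buckets (first caregiver per score wins) and then returns the highest non-empty bucket by a descending scan, reproducing A's first-wins tie-break.
import Mathlib
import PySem

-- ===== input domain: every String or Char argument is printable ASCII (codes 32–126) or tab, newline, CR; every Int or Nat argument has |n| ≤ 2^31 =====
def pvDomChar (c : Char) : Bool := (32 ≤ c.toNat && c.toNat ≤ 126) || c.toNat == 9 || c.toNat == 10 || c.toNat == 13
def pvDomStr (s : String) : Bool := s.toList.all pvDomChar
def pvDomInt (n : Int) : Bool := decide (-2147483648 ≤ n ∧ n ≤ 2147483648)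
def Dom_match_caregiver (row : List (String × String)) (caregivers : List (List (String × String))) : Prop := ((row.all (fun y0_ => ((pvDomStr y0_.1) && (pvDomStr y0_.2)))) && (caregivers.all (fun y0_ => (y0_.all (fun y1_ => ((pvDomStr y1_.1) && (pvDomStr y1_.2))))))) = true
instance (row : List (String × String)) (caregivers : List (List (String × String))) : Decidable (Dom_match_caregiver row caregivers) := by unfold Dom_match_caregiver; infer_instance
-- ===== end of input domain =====

-- B replaces A's best_id/best_score accumulator with score buckets: the score is bounded
-- (0..4), so each active caregiver's id is dropped into the bucket of its score (first one
-- wins) and the answer is the highest non-empty bucket (objective: alternative).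

-- ===== PORT A =====
def match_caregiver (row : List (String × String)) (caregivers : List (List (String × String))) : Option String :=
  let target_city := PySem.Str.lower (PySem.Str.strip (((PySem.Dict.mk row).get? "patient_city").getD ""))
  let proc := PySem.Str.lower (PySem.Str.strip (((PySem.Dict.mk row).get? "service_type").getD ""))
  let res := caregivers.foldl (fun (acc : Option String × Int) cg =>
    let d := PySem.Dict.mk cg
    let act0 := (d.get? "active").getD ""
    let act := if act0 = "" then "Y" else act0          -- (…or "Y"): empty string is falsy
    if PySem.Str.upper (PySem.Str.strip act) ≠ "Y" then acc
    else
      let score1 : Int := if PySem.Str.lower (PySem.Str.strip ((d.get? "city").getD "")) = target_city then 2 else 0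
      let skills := PySem.Str.lower (PySem.Str.strip ((d.get? "skills").getD ""))
      let score2 : Int :=
        if skills ≠ "" ∧ proc ≠ "" ∧ PySem.Str.isIn ((PySem.List.pyGet? ((PySem.Str.split? proc "_").getD []) 0).getD "") skills = true then score1 + 2
        else if skills ≠ "" ∧ PySem.Str.isIn (PySem.Str.lower (PySem.Str.strip (((PySem.Dict.mk row).get? "use_case").getD ""))) skills = true then score1 + 1
        else score1
      if score2 > acc.2 then (d.get? "caregiver_id", score2) else acc)
    ((none : Option String), (-1 : Int))
  res.1

-- ===== PORT B =====
-- _norm(s) = (s or "").strip().lower(): None and "" are both falsy, strip/lower of "" is ""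
def mcNorm (o : Option String) : String := PySem.Str.lower (PySem.Str.strip (o.getD ""))

def mcActive (cg : List (String × String)) : Bool :=
  let a := ((PySem.Dict.mk cg).get? "active").getD ""
  PySem.Str.upper (PySem.Str.strip (if a = "" then "Y" else a)) == "Y"

def mcScore (target_city proc use_case : String) (cg : List (String × String)) : Int :=
  let d := PySem.Dict.mk cg
  let s : Int := if mcNorm (d.get? "city") = target_city then 2 else 0
  let skills := mcNorm (d.get? "skills")
  if skills ≠ "" ∧ proc ≠ "" ∧ PySem.Str.isIn ((PySem.List.pyGet? ((PySem.Str.split? proc "_").getD []) 0).getD "") skills = true then s + 2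
  else if skills ≠ "" ∧ PySem.Str.isIn use_case skills = true then s + 1
  else s

def match_caregiver_alt (row : List (String × String)) (caregivers : List (List (String × String))) : Option String :=
  let target_city := mcNorm ((PySem.Dict.mk row).get? "patient_city")
  let proc := mcNorm ((PySem.Dict.mk row).get? "service_type")
  let use_case := mcNorm ((PySem.Dict.mk row).get? "use_case")
  let st := caregivers.foldl (fun (st : List Bool × List (Option String)) cg =>
      if mcActive cg then
        let s := mcScore target_city proc use_case cg
        if PySem.List.pyGetD st.1 s false = false then
          (PySem.List.pySetD st.1 s true, PySem.List.pySetD st.2 s ((PySem.Dict.mk cg).get? "caregiver_id"))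
        else st
      else st)
    ([false, false, false, false, false], [none, none, none, none, none])
  ((PySem.List.pyRange 4 (-1) (-1)).findSome? (fun s =>
      if PySem.List.pyGetD st.1 s false = true then some (PySem.List.pyGetD st.2 s none) else none)).getD none

-- ===== PRECONDITION & SPEC =====
def Spec_match_caregiver (row : List (String × String)) (caregivers : List (List (String × String))) (out : Option String) : Prop := out = match_caregiver_alt row caregivers
instance (row : List (String × String)) (caregivers : List (List (String × String))) (out : Option String) : Decidable (Spec_match_caregiver row caregivers out) := by unfold Spec_match_caregiver; infer_instance

-- ===== CLAIM (what is proved, stated in full; the proofs are below) =====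
def Claim_equal_match_caregiver : Prop := ∀ (row : List (String × String)) (caregivers : List (List (String × String))), Dom_match_caregiver row caregivers → Spec_match_caregiver row caregivers (match_caregiver row caregivers)

-- ===== LEMMAS AND PROOFS =====

-- A's loop body, abstracted over the activity test p, the score f and the id extraction g.
def pvStepA {α : Type} (p : α → Bool) (f : α → Int) (g : α → Option String)
    (acc : Option String × Int) (x : α) : Option String × Int :=
  if p x then (if f x > acc.2 then (g x, f x) else acc) else acc

-- B's loop body, abstracted the same way.
def pvStepB {α : Type} (p : α → Bool) (f : α → Int) (g : α → Option String)
    (st : List Bool × List (Option String)) (x : α) : List Bool × List (Option String) :=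
  if p x then
    (if PySem.List.pyGetD st.1 (f x) false = false then
      (PySem.List.pySetD st.1 (f x) true, PySem.List.pySetD st.2 (f x) (g x))
     else st)
  else st

-- Int-index get/set facts (thin wrappers over the library's Nat-index lemmas)
theorem pvGetSetSelf {β : Type} (xs : List β) (i : Int) (v d : β)
    (h0 : 0 ≤ i) (h1 : i < xs.length) :
    PySem.List.pyGetD (PySem.List.pySetD xs i v) i d = v := by
  rw [PySem.List.pySetD_of_nonneg _ _ h0,
      PySem.List.pyGetD_eq_getElem _ _ h0 (by simpa using h1)]
  simp

theorem pvGetSetNe {β : Type} (xs : List β) (i j : Int) (v d : β)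
    (h0 : 0 ≤ i) (hj0 : 0 ≤ j) (hne : j ≠ i) :
    PySem.List.pyGetD (PySem.List.pySetD xs i v) j d = PySem.List.pyGetD xs j d := by
  rw [PySem.List.pySetD_of_nonneg _ _ h0]
  by_cases hj : 0 ≤ j ∧ j < xs.length
  · rw [PySem.List.pyGetD_eq_getElem _ _ hj.1 (by simpa using hj.2),
        PySem.List.pyGetD_eq_getElem _ _ hj.1 hj.2]
    rw [List.getElem_set]
    simp only [if_neg (by omega : ¬ i.toNat = j.toNat)]
  · have h1 : ¬ PySem.Raise.InRange (xs.set i.toNat v).length j := by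
      simp [PySem.Raise.InRange] at *; omega
    have h2 : ¬ PySem.Raise.InRange xs.length j := by
      simp [PySem.Raise.InRange] at *; omega
    rw [PySem.List.pyGetD_of_none _ _ _ (by rwa [PySem.List.pyGet?_eq_none_iff]),
        PySem.List.pyGetD_of_none _ _ _ (by rwa [PySem.List.pyGet?_eq_none_iff])]

-- The coupling invariant: A's (best_id, best_score) against B's (seen, buckets).
def pvInv (acc : Option String × Int) (st : List Bool × List (Option String)) : Prop :=
  st.1.length = 5 ∧ st.2.length = 5 ∧ -1 ≤ acc.2 ∧ acc.2 < 5 ∧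
  (acc.2 = -1 → acc.1 = none) ∧
  (∀ s : Int, acc.2 < s → s < 5 → PySem.List.pyGetD st.1 s false = false) ∧
  (0 ≤ acc.2 → PySem.List.pyGetD st.1 acc.2 false = true ∧
               PySem.List.pyGetD st.2 acc.2 none = acc.1)

theorem pvStep_inv {α : Type} (p : α → Bool) (f : α → Int) (g : α → Option String)
    (hf : ∀ x, 0 ≤ f x ∧ f x < 5) (x : α)
    (acc : Option String × Int) (st : List Bool × List (Option String))
    (h : pvInv acc st) :
    pvInv (pvStepA p f g acc x) (pvStepB p f g st x) := by
  obtain ⟨hl1, hl2, hlo, hhi, hneg, hP1, hP2⟩ := h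
  by_cases hp : p x
  · obtain ⟨hf0, hf5⟩ := hf x
    simp only [pvStepA, pvStepB, hp, if_true, gt_iff_lt]
    by_cases hseen : PySem.List.pyGetD st.1 (f x) false = false
    · -- bucket empty: B sets it
      simp only [hseen, if_true]
      by_cases hgt : acc.2 < f x
      · -- A also takes the new caregiver
        simp only [hgt, if_true]
        refine ⟨by simp [PySem.List.length_pySetD, hl1],
                by simp [PySem.List.length_pySetD, hl2],
                by omega, by omega, by omega, ?_, ?_⟩
        · intro s hs1 hs2
          rw [pvGetSetNe _ _ _ _ _ hf0 (by omega) (by omega)]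
          exact hP1 s (by omega) hs2
        · intro _
          constructor
          · exact pvGetSetSelf _ _ _ _ hf0 (by omega)
          · exact pvGetSetSelf _ _ _ _ hf0 (by omega)
      · -- f x < acc.2 (equality impossible: the acc.2 bucket is already set)
        have hne : f x ≠ acc.2 := by
          intro he
          have := (hP2 (by omega)).1
          rw [← he] at this
          rw [hseen] at this
          exact Bool.false_ne_true this
        simp only [hgt, if_false]
        refine ⟨by simp [PySem.List.length_pySetD, hl1],
                by simp [PySem.List.length_pySetD, hl2],
                hlo, hhi, hneg, ?_, ?_⟩
        · intro s hs1 hs2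
          rw [pvGetSetNe _ _ _ _ _ hf0 (by omega) (by omega)]
          exact hP1 s hs1 hs2
        · intro hnn
          have h2 := hP2 hnn
          constructor
          · rw [pvGetSetNe _ _ _ _ _ hf0 (by omega) (by omega)]; exact h2.1
          · rw [pvGetSetNe _ _ _ _ _ hf0 (by omega) (by omega)]; exact h2.2
    · -- bucket already set: B keeps st, and f x ≤ acc.2 so A keeps acc
      have hle : ¬ acc.2 < f x := by
        intro hgt
        exact hseen (hP1 (f x) hgt hf5)
      simp only [hseen, if_false, hle]
      exact ⟨hl1, hl2, hlo, hhi, hneg, hP1, hP2⟩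
  · simp only [pvStepA, pvStepB, hp]
    exact ⟨hl1, hl2, hlo, hhi, hneg, hP1, hP2⟩

theorem pvFold_inv {α : Type} (p : α → Bool) (f : α → Int) (g : α → Option String)
    (hf : ∀ x, 0 ≤ f x ∧ f x < 5) (l : List α)
    (acc : Option String × Int) (st : List Bool × List (Option String))
    (h : pvInv acc st) :
    pvInv (l.foldl (pvStepA p f g) acc) (l.foldl (pvStepB p f g) st) := by
  induction l generalizing acc st with
  | nil => exact h
  | cons x t ih => exact ih _ _ (pvStep_inv p f g hf x acc st h)

theorem pvInv_init :
    pvInv ((none : Option String), (-1 : Int))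
          (([false, false, false, false, false] : List Bool),
           ([none, none, none, none, none] : List (Option String))) := by
  refine ⟨rfl, rfl, by norm_num, by norm_num, fun _ => rfl, ?_, by norm_num⟩
  intro s hs1 hs2
  have : s = 0 ∨ s = 1 ∨ s = 2 ∨ s = 3 ∨ s = 4 := by omega
  rcases this with h|h|h|h|h <;> subst h <;> decide

-- Extraction: under the invariant, the descending bucket scan returns A's best_id.
theorem pvExtract (acc : Option String × Int) (st : List Bool × List (Option String))
    (h : pvInv acc st) :
    acc.1 = ((PySem.List.pyRange 4 (-1) (-1)).findSome? (fun s =>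
        if PySem.List.pyGetD st.1 s false = true then some (PySem.List.pyGetD st.2 s none)
        else none)).getD none := by
  obtain ⟨_, _, hlo, hhi, hneg, hP1, hP2⟩ := h
  have hr : PySem.List.pyRange 4 (-1) (-1) = [4, 3, 2, 1, 0] := by decide
  rw [hr]
  have hk : acc.2 = -1 ∨ acc.2 = 0 ∨ acc.2 = 1 ∨ acc.2 = 2 ∨ acc.2 = 3 ∨ acc.2 = 4 := by omega
  rcases hk with hk|hk|hk|hk|hk|hk
  · have h4 := hP1 4 (by omega) (by omega)
    have h3 := hP1 3 (by omega) (by omega)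
    have h2 := hP1 2 (by omega) (by omega)
    have h1 := hP1 1 (by omega) (by omega)
    have h0 := hP1 0 (by omega) (by omega)
    simp [List.findSome?, h4, h3, h2, h1, h0, hneg hk]
  · obtain ⟨ht, hb⟩ := hP2 (by omega)
    rw [hk] at ht hb
    have h4 := hP1 4 (by omega) (by omega)
    have h3 := hP1 3 (by omega) (by omega)
    have h2 := hP1 2 (by omega) (by omega)
    have h1 := hP1 1 (by omega) (by omega)
    simp [List.findSome?, h4, h3, h2, h1, ht, hb]
  · obtain ⟨ht, hb⟩ := hP2 (by omega)
    rw [hk] at ht hb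
    have h4 := hP1 4 (by omega) (by omega)
    have h3 := hP1 3 (by omega) (by omega)
    have h2 := hP1 2 (by omega) (by omega)
    simp [List.findSome?, h4, h3, h2, ht, hb]
  · obtain ⟨ht, hb⟩ := hP2 (by omega)
    rw [hk] at ht hb
    have h4 := hP1 4 (by omega) (by omega)
    have h3 := hP1 3 (by omega) (by omega)
    simp [List.findSome?, h4, h3, ht, hb]
  · obtain ⟨ht, hb⟩ := hP2 (by omega)
    rw [hk] at ht hb
    have h4 := hP1 4 (by omega) (by omega)
    simp [List.findSome?, h4, ht, hb]
  · obtain ⟨ht, hb⟩ := hP2 (by omega)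
    rw [hk] at ht hb
    simp [List.findSome?, ht, hb]

theorem pvScore_bounds (tc proc uc : String) (cg : List (String × String)) :
    0 ≤ mcScore tc proc uc cg ∧ mcScore tc proc uc cg < 5 := by
  simp only [mcScore]
  split_ifs <;> norm_num

-- A's literal loop body is pvStepA instantiated with B's helpers.
theorem pvBodyA_eq (row : List (String × String)) (tc proc : String) :
    (fun (acc : Option String × Int) (cg : List (String × String)) =>
      let d := PySem.Dict.mk cg
      let act0 := (d.get? "active").getD ""
      let act := if act0 = "" then "Y" else act0
      if PySem.Str.upper (PySem.Str.strip act) ≠ "Y" then acc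
      else
        let score1 : Int := if PySem.Str.lower (PySem.Str.strip ((d.get? "city").getD "")) = tc then 2 else 0
        let skills := PySem.Str.lower (PySem.Str.strip ((d.get? "skills").getD ""))
        let score2 : Int :=
          if skills ≠ "" ∧ proc ≠ "" ∧ PySem.Str.isIn ((PySem.List.pyGet? ((PySem.Str.split? proc "_").getD []) 0).getD "") skills = true then score1 + 2
          else if skills ≠ "" ∧ PySem.Str.isIn (PySem.Str.lower (PySem.Str.strip (((PySem.Dict.mk row).get? "use_case").getD ""))) skills = true then score1 + 1
          else score1
        if score2 > acc.2 then (d.get? "caregiver_id", score2) else acc)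
    = pvStepA mcActive
        (mcScore tc proc (mcNorm ((PySem.Dict.mk row).get? "use_case")))
        (fun cg => (PySem.Dict.mk cg).get? "caregiver_id") := by
  funext acc cg
  simp only [pvStepA, mcActive, mcScore, mcNorm, beq_iff_eq]
  by_cases h : PySem.Str.upper (PySem.Str.strip
      (if (((PySem.Dict.mk cg).get? "active").getD "") = "" then "Y"
       else (((PySem.Dict.mk cg).get? "active").getD ""))) = "Y"
  · simp only [h, if_true, ite_not]
    split_ifs <;> rfl
  · simp [h]

-- B's literal loop body is pvStepB instantiated the same way.
theorem pvBodyB_eq (tc proc uc : String) :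
    (fun (st : List Bool × List (Option String)) (cg : List (String × String)) =>
      if mcActive cg then
        let s := mcScore tc proc uc cg
        if PySem.List.pyGetD st.1 s false = false then
          (PySem.List.pySetD st.1 s true, PySem.List.pySetD st.2 s ((PySem.Dict.mk cg).get? "caregiver_id"))
        else st
      else st)
    = pvStepB mcActive (mcScore tc proc uc)
        (fun cg => (PySem.Dict.mk cg).get? "caregiver_id") := by
  funext st cg
  simp only [pvStepB]

-- ===== VERDICT (by name: the statement is the Claim_ definition above) =====
theorem match_caregiver_spec : Claim_equal_match_caregiver := by
  intro row caregivers _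
  unfold Spec_match_caregiver
  simp only [match_caregiver, match_caregiver_alt]
  rw [pvBodyA_eq row (PySem.Str.lower (PySem.Str.strip (((PySem.Dict.mk row).get? "patient_city").getD "")))
      (PySem.Str.lower (PySem.Str.strip (((PySem.Dict.mk row).get? "service_type").getD "")))]
  rw [pvBodyB_eq]
  have hA : PySem.Str.lower (PySem.Str.strip (((PySem.Dict.mk row).get? "patient_city").getD ""))
      = mcNorm ((PySem.Dict.mk row).get? "patient_city") := rfl
  have hB : PySem.Str.lower (PySem.Str.strip (((PySem.Dict.mk row).get? "service_type").getD ""))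
      = mcNorm ((PySem.Dict.mk row).get? "service_type") := rfl
  rw [hA, hB]
  exact pvExtract _ _ (pvFold_inv mcActive
    (mcScore (mcNorm ((PySem.Dict.mk row).get? "patient_city"))
             (mcNorm ((PySem.Dict.mk row).get? "service_type"))
             (mcNorm ((PySem.Dict.mk row).get? "use_case")))
    (fun cg => (PySem.Dict.mk cg).get? "caregiver_id")
    (pvScore_bounds _ _ _) caregivers _ _ pvInv_init)
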